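-- pv_equiv track=rewrite | github.com/timothy-s-dev/aoc-2024 | solutions/day14.py | flood_count
-- ===== SOURCE A (Python) =====
-- def flood_count(start_x, start_y, positions):
--     valid_positions = set(positions)
--     frontier = [(start_x, start_y)]
--     total = 0
--     while frontier:
--         (x, y) = frontier.pop()
--         if (x, y) in valid_positions:
--             total += 1
--             valid_positions.remove((x, y))
--             frontier.extend([(x + 1, y), (x - 1, y), (x, y + 1), (x, y - 1)])
--     return total
-- ===== SOURCE B (Python) =====
-- def flood_count(start_x, start_y, positions):
--     valid = set(positions)
--     start = (start_x, start_y)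
--     if start not in valid:
--         return 0
--     comp = {start}
--     rem = valid - {start}
--     while True:
--         new = {(x + dx, y + dy)
--                for (x, y) in comp
--                for (dx, dy) in ((1, 0), (-1, 0), (0, 1), (0, -1))} & rem
--         if not new:
--             return len(comp)
--         comp |= new
--         rem -= new
-- ===== Notes on version B (the rewrite author's own statement) =====
-- stated objective: alternative
-- what changed: A runs a stack-based flood fill popping one cell at a time from a duplicate-laden frontier list and counting removals; B does a level-synchronized set-fixpoint expansion (whole-frontier set algebra per round, no per-cell stack, no counter) and returns the final component's size.
import Mathlib
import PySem

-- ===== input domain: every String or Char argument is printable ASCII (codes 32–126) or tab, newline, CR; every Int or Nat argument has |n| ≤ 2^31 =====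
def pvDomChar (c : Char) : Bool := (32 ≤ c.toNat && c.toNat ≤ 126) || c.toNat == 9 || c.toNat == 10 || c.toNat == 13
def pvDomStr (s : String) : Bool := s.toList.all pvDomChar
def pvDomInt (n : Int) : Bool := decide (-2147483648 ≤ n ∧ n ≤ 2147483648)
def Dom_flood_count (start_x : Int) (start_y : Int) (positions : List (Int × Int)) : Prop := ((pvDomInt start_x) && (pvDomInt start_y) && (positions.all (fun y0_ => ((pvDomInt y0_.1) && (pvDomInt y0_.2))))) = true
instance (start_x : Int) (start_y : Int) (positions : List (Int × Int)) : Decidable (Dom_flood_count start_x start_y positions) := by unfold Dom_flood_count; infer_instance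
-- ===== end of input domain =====

-- B replaces A's stack-based flood fill (pop one cell, count removals) by a level-synchronized
-- set-fixpoint expansion returning the final component's size; alternative decomposition, no speed claim.


-- the four grid neighbours [(x+1,y),(x-1,y),(x,y+1),(x,y-1)]; both Pythons enumerate this same list
def pvNbrs (p : Int × Int) : List (Int × Int) :=
  [(p.1 + 1, p.2), (p.1 - 1, p.2), (p.1, p.2 + 1), (p.1, p.2 - 1)]

-- ===== PORT A =====
-- A's while-loop: pop the last frontier entry; if still valid, count it, remove it
-- (Python's `.remove` after a successful membership test = `discard`) and push its neighbours.
def pvFloodA (valid : PySem.Set (Int × Int)) (frontier : List (Int × Int)) (total : Int) : Int :=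
  match hp : PySem.List.pop? frontier (-1) with
  | none => total
  | some (p, fr) =>
    if PySem.Set.contains valid p then
      pvFloodA (PySem.Set.discard valid p) (fr ++ pvNbrs p) (total + 1)
    else
      pvFloodA valid fr total
termination_by (valid.length, frontier.length)
decreasing_by
  · apply Prod.Lex.left
    have hm : p ∈ valid := by
      simpa using PySem.Set.contains_iff valid p |>.mp (by assumption)
    have hlt : (valid.filter (fun y => !y == p)).length < valid.length :=
      List.length_filter_lt_length_iff_exists.mpr ⟨p, hm, by simp⟩
    simpa [PySem.Set.discard] using hlt
  · apply Prod.Lex.right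
    have h2 : fr.length + 1 = frontier.length := PySem.List.length_of_pop?_eq_some frontier hp
    omega

def flood_count (start_x : Int) (start_y : Int) (positions : List (Int × Int)) : Int :=
  pvFloodA (PySem.Set.ofList positions) [(start_x, start_y)] 0

-- ===== PORT B =====
-- B's fixpoint loop: each round takes the whole neighbour set of `comp` inside `rem`;
-- when nothing new appears, return |comp|.
def pvFloodB (comp : PySem.Set (Int × Int)) (rem : PySem.Set (Int × Int)) : Int :=
  let nw := PySem.Set.inter (PySem.Set.ofList (comp.flatMap pvNbrs)) rem
  if h : nw.isEmpty then
    PySem.Set.len comp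
  else
    pvFloodB (PySem.Set.update comp nw) (PySem.Set.diff rem nw)
termination_by rem.length
decreasing_by
  obtain ⟨x, hx⟩ := List.exists_mem_of_ne_nil nw (by simpa [List.isEmpty_iff] using h)
  have hxr : x ∈ rem := by
    have := hx
    simp only [nw, PySem.Set.inter, List.mem_filter] at this
    exact PySem.Set.contains_iff rem x |>.mp this.2
  have hlt : (rem.filter (fun y => !nw.contains y)).length < rem.length :=
    List.length_filter_lt_length_iff_exists.mpr ⟨x, hxr, by simp [hx]⟩
  exact hlt

def flood_count_alt (start_x : Int) (start_y : Int) (positions : List (Int × Int)) : Int :=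
  let valid := PySem.Set.ofList positions
  if PySem.Set.contains valid (start_x, start_y) then
    pvFloodB [(start_x, start_y)] (PySem.Set.diff valid [(start_x, start_y)])
  else
    0

-- ===== PRECONDITION & SPEC =====
def Spec_flood_count (start_x : Int) (start_y : Int) (positions : List (Int × Int)) (out : Int) : Prop := out = flood_count_alt start_x start_y positions
instance (start_x : Int) (start_y : Int) (positions : List (Int × Int)) (out : Int) : Decidable (Spec_flood_count start_x start_y positions out) := by unfold Spec_flood_count; infer_instance

-- ===== CLAIM (what is proved, stated in full; the proofs are below) =====
def Claim_equal_flood_count : Prop := ∀ (start_x : Int) (start_y : Int) (positions : List (Int × Int)), Dom_flood_count start_x start_y positions → Spec_flood_count start_x start_y positions (flood_count start_x start_y positions)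

-- ===== LEMMAS AND PROOFS =====

-- one step of flood connectivity inside the cell set V: move to an adjacent cell of V
def pvStep (V : Set (Int × Int)) (u v : Int × Int) : Prop := v ∈ V ∧ v ∈ pvNbrs u

-- cells reachable inside V from some frontier cell that is itself in V
def pvReach (V F : Set (Int × Int)) : Set (Int × Int) :=
  {c | ∃ f ∈ F, f ∈ V ∧ Relation.ReflTransGen (pvStep V) f c}

def pvMem (l : List (Int × Int)) : Set (Int × Int) := {x | x ∈ l}

lemma pvMem_finite (l : List (Int × Int)) : (pvMem l).Finite := l.finite_toSet

lemma pvStep_path_mem {V : Set (Int × Int)} {a c : Int × Int}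
    (h : Relation.ReflTransGen (pvStep V) a c) : a ∈ V → c ∈ V := by
  induction h using Relation.ReflTransGen.head_induction_on with
  | refl => exact id
  | @head a b hab hbc ih => exact fun _ => ih hab.1

lemma pvReach_subset (V F : Set (Int × Int)) : pvReach V F ⊆ V := by
  rintro c ⟨f, _, hfV, hpath⟩
  exact pvStep_path_mem hpath hfV

lemma pvReach_mono_frontier {V F G : Set (Int × Int)} (h : F ⊆ G) :
    pvReach V F ⊆ pvReach V G := by
  rintro c ⟨f, hfF, hfV, hpath⟩
  exact ⟨f, h hfF, hfV, hpath⟩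

-- a frontier cell not in V contributes nothing
lemma pvReach_union_singleton_of_not_mem {V F : Set (Int × Int)} {p : Int × Int}
    (hp : p ∉ V) : pvReach V (F ∪ {p}) = pvReach V F := by
  apply Set.Subset.antisymm
  · rintro c ⟨f, hfF, hfV, hpath⟩
    rcases hfF with hfF | rfl
    · exact ⟨f, hfF, hfV, hpath⟩
    · exact absurd hfV hp
  · exact pvReach_mono_frontier Set.subset_union_left

-- path surgery: a path in V to c ≠ p either avoids p entirely, or has a final
-- departure from p through one of p's neighbours
lemma pvAvoid {V : Set (Int × Int)} {p a c : Int × Int}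
    (h : Relation.ReflTransGen (pvStep V) a c) (hc : c ≠ p) :
    (Relation.ReflTransGen (pvStep (V \ {p})) a c ∧ a ≠ p) ∨
      (∃ y ∈ pvNbrs p, y ∈ V \ {p} ∧ Relation.ReflTransGen (pvStep (V \ {p})) y c) := by
  induction h using Relation.ReflTransGen.head_induction_on with
  | refl => exact Or.inl ⟨Relation.ReflTransGen.refl, hc⟩
  | @head a b hab hbc ih =>
    rcases ih with ⟨hpath, hbp⟩ | ⟨y, hyN, hyV, hypath⟩
    · have hbV' : b ∈ V \ {p} := ⟨hab.1, hbp⟩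
      by_cases ha : a = p
      · exact Or.inr ⟨b, ha ▸ hab.2, hbV', hpath⟩
      · exact Or.inl ⟨Relation.ReflTransGen.head ⟨hbV', hab.2⟩ hpath, ha⟩
    · exact Or.inr ⟨y, hyN, hyV, hypath⟩

-- popping a valid cell p: the reachable set splits into p itself plus what is
-- reachable from the rest of the frontier and p's neighbours, with p removed from V
lemma pvReach_pop {V F : Set (Int × Int)} {p : Int × Int} (hp : p ∈ V) :
    pvReach V (F ∪ {p}) = insert p (pvReach (V \ {p}) (F ∪ pvMem (pvNbrs p))) := by
  apply Set.Subset.antisymm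
  · rintro c ⟨f, hfF, hfV, hpath⟩
    by_cases hcp : c = p
    · exact Or.inl hcp
    · refine Or.inr ?_
      rcases pvAvoid hpath hcp with ⟨hpath', hfp⟩ | ⟨y, hyN, hyV, hypath⟩
      · rcases hfF with hfF | rfl
        · exact ⟨f, Or.inl hfF, ⟨hfV, hfp⟩, hpath'⟩
        · exact absurd rfl hfp
      · exact ⟨y, Or.inr hyN, hyV, hypath⟩
  · rintro c (rfl | ⟨f, hfF, hfV, hpath⟩)
    · exact ⟨c, Or.inr rfl, hp, Relation.ReflTransGen.refl⟩
    · have hlift : Relation.ReflTransGen (pvStep V) f c :=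
        hpath.mono (fun u v huv => ⟨huv.1.1, huv.2⟩)
      rcases hfF with hfF | hfN
      · exact ⟨f, Or.inl hfF, hfV.1, hlift⟩
      · exact ⟨p, Or.inr rfl, hp, Relation.ReflTransGen.head ⟨hfV.1, hfN⟩ hlift⟩

lemma pvPop_some {p : Int × Int} {xs fr : List (Int × Int)}
    (h : PySem.List.pop? xs = some (p, fr)) : xs = fr ++ [p] := by
  rcases List.eq_nil_or_concat xs with rfl | ⟨ys, y, rfl⟩
  · simp [PySem.List.pop?, PySem.List.pyIdx?] at h
  · rw [List.concat_eq_append, PySem.List.pop?_last] at h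
    obtain ⟨rfl, rfl⟩ : y = p ∧ ys = fr := by simpa using h
    simp

-- unfolding equations for A's loop
lemma pvFloodA_unfold_none (valid : PySem.Set (Int × Int)) {frontier : List (Int × Int)}
    (hp : PySem.List.pop? frontier = none) (total : Int) :
    pvFloodA valid frontier total = total := by
  rw [pvFloodA]
  split
  · rfl
  · next p1 fr1 heq => rw [hp] at heq; cases heq

lemma pvFloodA_unfold_some (valid : PySem.Set (Int × Int)) {frontier : List (Int × Int)}
    {p : Int × Int} {fr : List (Int × Int)}
    (hp : PySem.List.pop? frontier = some (p, fr)) (total : Int) :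
    pvFloodA valid frontier total
      = if PySem.Set.contains valid p then
          pvFloodA (PySem.Set.discard valid p) (fr ++ pvNbrs p) (total + 1)
        else pvFloodA valid fr total := by
  rw [pvFloodA]
  split
  · next heq => rw [hp] at heq; cases heq
  · next p1 fr1 heq =>
    have h := hp.symm.trans heq
    injection h with h
    cases h
    rfl

lemma pvMem_append (xs ys : List (Int × Int)) :
    pvMem (xs ++ ys) = pvMem xs ∪ pvMem ys := by
  ext c; simp [pvMem]

lemma pvMem_singleton (p : Int × Int) : pvMem [p] = {p} := by
  ext c; simp [pvMem]

-- A's loop invariant: the running total plus the number of cells still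
-- reachable equals the final answer
lemma pvFloodA_eq (valid : PySem.Set (Int × Int)) (frontier : List (Int × Int)) (total : Int) :
    pvFloodA valid frontier total
      = total + ((pvReach (pvMem valid) (pvMem frontier)).ncard : Int) := by
  induction valid, frontier, total using pvFloodA.induct with
  | case1 valid frontier total hp =>
    have hnil : frontier = [] := by
      rcases List.eq_nil_or_concat frontier with rfl | ⟨ys, y, rfl⟩
      · rfl
      · rw [List.concat_eq_append, PySem.List.pop?_last] at hp; exact absurd hp (by simp)
    subst hnil
    rw [pvFloodA_unfold_none valid hp]
    have : pvReach (pvMem valid) (pvMem []) = ∅ := by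
      ext c; simp [pvReach, pvMem]
    simp [this]
  | case2 valid frontier total p fr hp hmem ih =>
    obtain rfl := pvPop_some hp
    have hpV : p ∈ pvMem valid := (PySem.Set.contains_iff valid p).mp hmem
    rw [pvFloodA_unfold_some valid hp, if_pos hmem, ih]
    have hdis : pvMem (PySem.Set.discard valid p) = pvMem valid \ {p} := by
      ext c; simp [pvMem, PySem.Set.mem_discard]
    rw [pvMem_append fr [p], pvMem_append fr (pvNbrs p), pvMem_singleton,
      pvReach_pop hpV, hdis]
    have hS : pvReach (pvMem valid \ {p}) (pvMem fr ∪ pvMem (pvNbrs p)) ⊆ pvMem valid \ {p} :=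
      pvReach_subset _ _
    have hfin : (pvReach (pvMem valid \ {p}) (pvMem fr ∪ pvMem (pvNbrs p))).Finite :=
      ((pvMem_finite valid).diff).subset hS
    have hpnot : p ∉ pvReach (pvMem valid \ {p}) (pvMem fr ∪ pvMem (pvNbrs p)) :=
      fun hpc => (hS hpc).2 rfl
    rw [Set.ncard_insert_of_notMem hpnot hfin]
    push_cast
    ring
  | case3 valid frontier total p fr hp hmem ih =>
    obtain rfl := pvPop_some hp
    have hpV : p ∉ pvMem valid := fun hc => hmem ((PySem.Set.contains_iff valid p).mpr hc)
    rw [pvFloodA_unfold_some valid hp, if_neg hmem, ih, pvMem_append fr [p], pvMem_singleton, pvReach_union_singleton_of_not_mem hpV]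

-- if no neighbour of comp lies in rem, reachability from comp stays inside comp
lemma pvReach_closed {comp rem : PySem.Set (Int × Int)}
    (hcl : ∀ u ∈ comp, ∀ v ∈ pvNbrs u, v ∉ rem) :
    pvReach (pvMem comp ∪ pvMem rem) (pvMem comp) = pvMem comp := by
  have key : ∀ a c : Int × Int,
      Relation.ReflTransGen (pvStep (pvMem comp ∪ pvMem rem)) a c →
      a ∈ pvMem comp → c ∈ pvMem comp := by
    intro a c hpath
    induction hpath using Relation.ReflTransGen.head_induction_on with
    | refl => exact id
    | @head a b hab hbc ih =>
      intro haC
      refine ih ?_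
      rcases hab.1 with hbC | hbR
      · exact hbC
      · exact absurd hbR (hcl a haC b hab.2)
  apply Set.Subset.antisymm
  · rintro c ⟨f, hfF, -, hpath⟩
    exact key f c hpath hfF
  · intro c hc
    exact ⟨c, hc, Or.inl hc, Relation.ReflTransGen.refl⟩

-- absorbing a layer of already-adjacent valid cells into the frontier changes nothing
lemma pvReach_absorb {V C N : Set (Int × Int)} (hCV : C ⊆ V)
    (hN : ∀ f ∈ N, f ∈ V ∧ ∃ u ∈ C, f ∈ pvNbrs u) :
    pvReach V (C ∪ N) = pvReach V C := by
  apply Set.Subset.antisymm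
  · rintro c ⟨f, hfF, hfV, hpath⟩
    rcases hfF with hfC | hfN
    · exact ⟨f, hfC, hfV, hpath⟩
    · obtain ⟨-, u, huC, hun⟩ := hN f hfN
      exact ⟨u, huC, hCV huC, Relation.ReflTransGen.head ⟨hfV, hun⟩ hpath⟩
  · exact pvReach_mono_frontier Set.subset_union_left

lemma pvMem_ncard_of_nodup {l : List (Int × Int)} (h : l.Nodup) :
    (pvMem l).ncard = l.length := by
  have : pvMem l = ↑l.toFinset := by ext c; simp [pvMem]
  rw [this, Set.ncard_coe_finset, List.toFinset_card_of_nodup h]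

-- B's loop invariant
lemma pvFloodB_eq (comp rem : PySem.Set (Int × Int))
    (hc : comp.Nodup) (hr : rem.Nodup) (hd : ∀ x ∈ comp, x ∉ rem) :
    pvFloodB comp rem
      = ((pvReach (pvMem comp ∪ pvMem rem) (pvMem comp)).ncard : Int) := by
  induction hn : rem.length using Nat.strong_induction_on generalizing comp rem with
  | _ n ihn =>
  subst hn
  rw [pvFloodB]
  set nw := PySem.Set.inter (PySem.Set.ofList (comp.flatMap pvNbrs)) rem with hnw
  have hmem_nw : ∀ x, x ∈ nw ↔ (∃ u ∈ comp, x ∈ pvNbrs u) ∧ x ∈ rem := by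
    intro x
    simp [hnw, PySem.Set.inter, List.mem_filter, PySem.Set.mem_ofList, List.mem_flatMap]
  by_cases hE : nw.isEmpty
  · rw [dif_pos hE]
    have hcl : ∀ u ∈ comp, ∀ v ∈ pvNbrs u, v ∉ rem := by
      intro u hu v hv hvr
      have : v ∈ nw := (hmem_nw v).mpr ⟨⟨u, hu, hv⟩, hvr⟩
      rw [List.isEmpty_iff] at hE
      simp [hE] at this
    rw [pvReach_closed hcl, pvMem_ncard_of_nodup hc]
    rfl
  · rw [dif_neg hE]
    have hsub : ∀ x ∈ nw, x ∈ rem := fun x hx => ((hmem_nw x).mp hx).2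
    have hlen : (PySem.Set.diff rem nw).length < rem.length := by
      obtain ⟨x, hx⟩ := List.exists_mem_of_ne_nil nw (by simpa [List.isEmpty_iff] using hE)
      exact List.length_filter_lt_length_iff_exists.mpr ⟨x, hsub x hx, by simp [hx]⟩
    have hc' : (PySem.Set.update comp nw).Nodup := PySem.Set.nodup_update comp nw hc
    have hr' : (PySem.Set.diff rem nw).Nodup := PySem.Set.nodup_diff rem nw hr
    have hd' : ∀ x ∈ PySem.Set.update comp nw, x ∉ PySem.Set.diff rem nw := by
      intro x hx hx'
      rw [PySem.Set.mem_update] at hx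
      have hx'' := (PySem.Set.mem_diff rem nw x).mp hx'
      rcases hx with hxC | hxN
      · exact hd x hxC hx''.1
      · exact hx''.2 hxN
    rw [ihn _ hlen _ _ hc' hr' hd' rfl]
    have hCup : pvMem (PySem.Set.update comp nw) = pvMem comp ∪ pvMem nw := by
      ext c; simp [pvMem, PySem.Set.mem_update]
    have hRdi : pvMem (PySem.Set.diff rem nw) = pvMem rem \ pvMem nw := by
      ext c; simp [pvMem, PySem.Set.mem_diff]
    have hUeq : pvMem comp ∪ pvMem nw ∪ (pvMem rem \ pvMem nw)
        = pvMem comp ∪ pvMem rem := by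
      ext c
      constructor
      · rintro ((h | h) | ⟨h, -⟩)
        · exact Or.inl h
        · exact Or.inr (hsub c h)
        · exact Or.inr h
      · rintro (h | h)
        · exact Or.inl (Or.inl h)
        · by_cases hcn : c ∈ pvMem nw
          · exact Or.inl (Or.inr hcn)
          · exact Or.inr ⟨h, hcn⟩
    rw [hCup, hRdi, hUeq,
      pvReach_absorb (V := pvMem comp ∪ pvMem rem) (C := pvMem comp) (N := pvMem nw)
        Set.subset_union_left
        (fun f hf => ⟨Or.inr (hsub f hf), ((hmem_nw f).mp hf).1⟩)]

-- ===== VERDICT (by name: the statement is the Claim_ definition above) =====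
theorem flood_count_spec : Claim_equal_flood_count := by
  intro sx sy positions _
  show flood_count sx sy positions = flood_count_alt sx sy positions
  unfold flood_count flood_count_alt
  set valid := PySem.Set.ofList positions with hv
  set s : Int × Int := (sx, sy) with hs
  rw [pvFloodA_eq]
  by_cases hmem : s ∈ valid
  · rw [if_pos ((PySem.Set.contains_iff valid s).mpr hmem)]
    rw [pvFloodB_eq _ _ (by simp) (PySem.Set.nodup_diff _ _ (PySem.Set.nodup_ofList positions))
      (by
        intro x hx hx'
        have := (PySem.Set.mem_diff valid [s] x).mp hx'
        simp only [List.mem_singleton] at hx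
        exact this.2 (by simpa using hx))]
    have h1 : pvMem (PySem.Set.diff valid [s]) = pvMem valid \ {s} := by
      ext c; simp [pvMem, PySem.Set.mem_diff]
    have h2 : pvMem [s] ∪ (pvMem valid \ {s}) = pvMem valid := by
      rw [pvMem_singleton]
      ext c
      constructor
      · rintro (rfl | ⟨h, -⟩)
        · exact hmem
        · exact h
      · intro h
        by_cases hcs : c = s
        · exact Or.inl hcs
        · exact Or.inr ⟨h, hcs⟩
    rw [h1, h2, zero_add]
  · rw [if_neg (fun hc => hmem ((PySem.Set.contains_iff valid s).mp hc))]
    have : pvReach (pvMem valid) (pvMem [s]) = ∅ := by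
      ext c
      simp only [Set.mem_empty_iff_false, iff_false]
      rintro ⟨f, hfF, hfV, -⟩
      rw [pvMem_singleton, Set.mem_singleton_iff] at hfF
      subst hfF
      exact hmem hfV
    rw [this]
    simp
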